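-- pv_equiv track=rewrite | github.com/Aysinghal/quantum-manifold-optimization | run_all_parallel.py | _resolve_names
-- ===== SOURCE A (Python) =====
-- def _resolve_names(flag_value, tier_registry, individual_set, axis_name):
--     """Resolve a comma-separated CLI list against a tier registry and an
--     individual-name set, supporting four input shapes (and any mix of them):
--
--       1. Single tier name             e.g. 'torus_concept'
--       2. Comma-separated tier names   e.g. 'sanity,qng_advantage'
--       3. Single individual name       e.g. 'Adam'
--       4. Comma-separated individuals  e.g. 'Adam,QNG_block'
--       5. Any mix of the above         e.g. 'torus_concept,QNG_full'
--
--     Each token is independently looked up: tier names expand to their list,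
--     individual names pass through as-is. Returns (tier_keys, flat_items)
--     where flat_items preserves first-seen order across the union and dedupes.
--     Tokens that match neither raise SystemExit with a helpful diagnostic.
--     """
--     tokens = [k.strip() for k in flag_value.split(",") if k.strip()]
--     seen, out, tier_keys = set(), [], []
--     for tok in tokens:
--         if tok in tier_registry:
--             tier_keys.append(tok)
--             for item in tier_registry[tok]:
--                 if item not in seen:
--                     seen.add(item)
--                     out.append(item)
--         elif tok in individual_set:
--             if tok not in seen:
--                 seen.add(tok)
--                 out.append(tok)
--         else:
--             raise SystemExit(
--                 f"Unknown {axis_name}: {tok!r}. "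
--                 f"Defined tiers: {sorted(tier_registry.keys())}. "
--                 f"Defined individuals: {sorted(individual_set)}."
--             )
--     return tier_keys, out
-- ===== SOURCE B (Python) =====
-- def _resolve_names(flag_value, tier_registry, individual_set, axis_name):
--     """Validate-then-build decomposition: first check every token is known
--     (raising on the first unknown, same message), then produce tier_keys and
--     the flat expansion by comprehensions and dedupe once at the end with
--     dict.fromkeys (first-seen order)."""
--     tokens = [k.strip() for k in flag_value.split(",") if k.strip()]
--     for tok in tokens:
--         if tok not in tier_registry and tok not in individual_set:
--             raise SystemExit(
--                 f"Unknown {axis_name}: {tok!r}. "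
--                 f"Defined tiers: {sorted(tier_registry.keys())}. "
--                 f"Defined individuals: {sorted(individual_set)}."
--             )
--     tier_keys = [t for t in tokens if t in tier_registry]
--     collected = [item for t in tokens
--                  for item in (tier_registry[t] if t in tier_registry else [t])]
--     return tier_keys, list(dict.fromkeys(collected))
-- ===== Notes on version B (the rewrite author's own statement) =====
-- stated objective: simpler
-- what changed: Replaces A's single loop that interleaves dedup-as-you-go with a seen-set and two accumulators by a validate-first pass, two comprehensions (tier_keys and the flat expansion with duplicates) and one dict.fromkeys dedupe at the end.
import Mathlib
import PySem

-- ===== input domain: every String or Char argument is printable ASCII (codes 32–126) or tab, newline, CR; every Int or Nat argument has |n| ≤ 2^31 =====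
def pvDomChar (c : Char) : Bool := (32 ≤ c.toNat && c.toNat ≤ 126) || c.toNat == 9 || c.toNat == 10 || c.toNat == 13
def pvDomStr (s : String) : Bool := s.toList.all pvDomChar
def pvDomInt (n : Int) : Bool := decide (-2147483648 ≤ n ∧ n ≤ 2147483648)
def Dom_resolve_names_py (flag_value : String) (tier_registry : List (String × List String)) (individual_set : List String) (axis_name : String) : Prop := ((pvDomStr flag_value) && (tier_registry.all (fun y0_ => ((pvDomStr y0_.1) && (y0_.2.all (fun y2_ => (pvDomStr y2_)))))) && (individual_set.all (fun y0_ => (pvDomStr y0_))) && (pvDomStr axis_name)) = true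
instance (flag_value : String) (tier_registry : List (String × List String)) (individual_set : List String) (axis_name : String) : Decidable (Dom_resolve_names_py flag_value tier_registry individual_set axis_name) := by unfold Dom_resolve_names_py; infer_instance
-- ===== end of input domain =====

-- B replaces A's interleaved dedupe-as-you-go accumulator loop by a validate pass,
-- two comprehensions and a single dict.fromkeys dedupe at the end (objective: simpler).


-- ===== PORT A =====
-- tokens = [k.strip() for k in flag_value.split(",") if k.strip()]  (shared by both sources verbatim)
def pvTokens (flag_value : String) : List String :=
  (((PySem.Str.split? flag_value ",").getD []).map PySem.Str.strip).filter (fun t => t ≠ "")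

-- A's loop; `none` = the SystemExit branch (excluded by Pre_)
def resolveGoA (tr : PySem.Dict String (List String)) (ind : List String) :
    List String → List String → List String → List String → Option (List String × List String)
  | [], _, out, tier_keys => some (tier_keys, out)
  | tok :: rest, seen, out, tier_keys =>
    if tr.contains tok then
      let p := (tr.getD tok []).foldl
        (fun (p : List String × List String) item =>
          if PySem.Set.contains p.1 item then p else (PySem.Set.add p.1 item, p.2 ++ [item]))
        (seen, out)
      resolveGoA tr ind rest p.1 p.2 (tier_keys ++ [tok])
    else if PySem.Set.contains ind tok then
      if PySem.Set.contains seen tok then resolveGoA tr ind rest seen out tier_keys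
      else resolveGoA tr ind rest (PySem.Set.add seen tok) (out ++ [tok]) tier_keys
    else none

def resolve_names_py (flag_value : String) (tier_registry : List (String × List String)) (individual_set : List String) (axis_name : String) : List String × List String :=
  (resolveGoA (PySem.Dict.mk tier_registry) individual_set (pvTokens flag_value) [] [] []).getD ([], [])

-- ===== PORT B =====
def resolve_names_py_alt (flag_value : String) (tier_registry : List (String × List String)) (individual_set : List String) (axis_name : String) : List String × List String :=
  let tr := PySem.Dict.mk tier_registry
  let tokens := pvTokens flag_value
  if tokens.all (fun t => tr.contains t || PySem.Set.contains individual_set t) then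
    let tier_keys := tokens.filter (fun t => tr.contains t)
    let collected := tokens.flatMap (fun t => if tr.contains t then tr.getD t [] else [t])
    (tier_keys, PySem.List.dedup collected)
  else ([], [])  -- B raises SystemExit here, like A; excluded by Pre_

-- ===== PRECONDITION & SPEC =====
-- Pre_ excludes exactly the inputs on which A (and B) raise SystemExit: some token
-- matches neither a tier key nor an individual name.
def Pre_resolve_names_py (flag_value : String) (tier_registry : List (String × List String)) (individual_set : List String) (axis_name : String) : Prop :=
  (pvTokens flag_value).all
    (fun t => (PySem.Dict.mk tier_registry).contains t || PySem.Set.contains individual_set t) = true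
instance (flag_value : String) (tier_registry : List (String × List String)) (individual_set : List String) (axis_name : String) : Decidable (Pre_resolve_names_py flag_value tier_registry individual_set axis_name) := by unfold Pre_resolve_names_py; infer_instance

def pvWitness_resolve_names_py : String × (List (String × List String)) × List String × String :=
  ("sanity, Adam,sanity", [("sanity", ["QNG_block", "Adam"])], ["Adam", "Eve"], "ansatz")

def Spec_resolve_names_py (flag_value : String) (tier_registry : List (String × List String)) (individual_set : List String) (axis_name : String) (out : List String × List String) : Prop := out = resolve_names_py_alt flag_value tier_registry individual_set axis_name
instance (flag_value : String) (tier_registry : List (String × List String)) (individual_set : List String) (axis_name : String) (out : List String × List String) : Decidable (Spec_resolve_names_py flag_value tier_registry individual_set axis_name out) := by unfold Spec_resolve_names_py; infer_instance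

-- ===== CLAIM (what is proved, stated in full; the proofs are below) =====
def Claim_equal_resolve_names_py : Prop := ∀ (flag_value : String) (tier_registry : List (String × List String)) (individual_set : List String) (axis_name : String), Dom_resolve_names_py flag_value tier_registry individual_set axis_name → Pre_resolve_names_py flag_value tier_registry individual_set axis_name → Spec_resolve_names_py flag_value tier_registry individual_set axis_name (resolve_names_py flag_value tier_registry individual_set axis_name)

-- ===== LEMMAS AND PROOFS =====

-- A's inner item loop with seen = out collapses to foldl Set.add on both components.
lemma pairFold (items acc : List String) :
    items.foldl
      (fun (p : List String × List String) item =>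
        if PySem.Set.contains p.1 item then p else (PySem.Set.add p.1 item, p.2 ++ [item]))
      (acc, acc)
    = (items.foldl PySem.Set.add acc, items.foldl PySem.Set.add acc) := by
  induction items generalizing acc with
  | nil => rfl
  | cons x xs ih =>
    simp only [List.foldl_cons, PySem.Set.add]
    by_cases h : PySem.Set.contains acc x = true
    · simp only [h, if_true]
      exact ih acc
    · simp only [h, if_false, Bool.false_eq_true]
      exact ih (acc ++ [x])

-- Characterisation of A's loop on all-known tokens, with seen = out.
lemma resolveGoA_spec (tr : PySem.Dict String (List String)) (ind : List String)
    (toks : List String) (acc tk : List String)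
    (h : toks.all (fun t => tr.contains t || PySem.Set.contains ind t) = true) :
    resolveGoA tr ind toks acc acc tk
      = some (tk ++ toks.filter (fun t => tr.contains t),
              (toks.flatMap (fun t => if tr.contains t then tr.getD t [] else [t])).foldl
                PySem.Set.add acc) := by
  induction toks generalizing acc tk with
  | nil => simp [resolveGoA]
  | cons tok rest ih =>
    simp only [List.all_cons, Bool.and_eq_true, Bool.or_eq_true] at h
    obtain ⟨hk, hrest⟩ := h
    by_cases htr : tr.contains tok = true
    · simp only [resolveGoA, htr, if_pos, pairFold]
      rw [ih _ _ hrest]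
      simp [htr, List.append_assoc]
    · have hind : PySem.Set.contains ind tok = true := hk.resolve_left htr
      simp only [resolveGoA, if_neg htr, if_pos hind]
      by_cases hs : tok ∈ acc
      · rw [if_pos ((PySem.Set.contains_iff acc tok).mpr hs), ih _ _ hrest]
        simp [htr, PySem.Set.add, hs]
      · rw [if_neg (fun hc => hs ((PySem.Set.contains_iff acc tok).mp hc)),
            show PySem.Set.add acc tok = acc ++ [tok] from by
              simp [PySem.Set.add, hs],
            ih _ _ hrest]
        simp [htr, PySem.Set.add, hs]

-- ===== VERDICT (by name: the statement is the Claim_ definition above) =====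
theorem resolve_names_py_spec : Claim_equal_resolve_names_py := by
  intro flag_value tier_registry individual_set axis_name _ hpre
  unfold Pre_resolve_names_py at hpre
  simp only [Spec_resolve_names_py, resolve_names_py, resolve_names_py_alt]
  rw [resolveGoA_spec _ _ _ _ _ hpre, if_pos hpre]
  simp [PySem.List.dedup_eq_ofList, PySem.Set.ofList_eq_foldl]
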